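-- pv_equiv track=rewrite | github.com/jg-lima/batalha_naval | interface_jogo.py | obter_parte_navio
-- ===== SOURCE A (Python) =====
-- def obter_parte_navio(tabuleiro, coluna, linha):
--     id_navio = tabuleiro[linha][coluna]
--     if id_navio == 0:
--         return 0
--
--     # Encontra a primeira coluna do navio
--     primeira_coluna = coluna
--     while primeira_coluna > 0 and tabuleiro[linha][primeira_coluna - 1] == id_navio:
--         primeira_coluna -= 1
--
--     # Retorna qual parte é (1, 2 ou 3)
--     return coluna - primeira_coluna + 1
-- ===== SOURCE B (Python) =====
-- def obter_parte_navio(tabuleiro, coluna, linha):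
--     linha_atual = tabuleiro[linha]
--     id_navio = linha_atual[coluna]
--     if id_navio == 0:
--         return 0
--     # forward run-length pass over the strict prefix: length of the run of
--     # id_navio cells ending just before coluna; the cell at coluna is the +1
--     corrida = 0
--     for c in range(coluna):
--         corrida = corrida + 1 if linha_atual[c] == id_navio else 0
--     return corrida + 1
-- ===== Notes on version B (the rewrite author's own statement) =====
-- stated objective: alternative
-- what changed: B replaces A's backward while-walk to the ship's first column with a single forward run-length pass over the strict row prefix [0..coluna), maintaining a reset-on-miss counter and returning counter+1 for the cell itself.
import Mathlib
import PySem

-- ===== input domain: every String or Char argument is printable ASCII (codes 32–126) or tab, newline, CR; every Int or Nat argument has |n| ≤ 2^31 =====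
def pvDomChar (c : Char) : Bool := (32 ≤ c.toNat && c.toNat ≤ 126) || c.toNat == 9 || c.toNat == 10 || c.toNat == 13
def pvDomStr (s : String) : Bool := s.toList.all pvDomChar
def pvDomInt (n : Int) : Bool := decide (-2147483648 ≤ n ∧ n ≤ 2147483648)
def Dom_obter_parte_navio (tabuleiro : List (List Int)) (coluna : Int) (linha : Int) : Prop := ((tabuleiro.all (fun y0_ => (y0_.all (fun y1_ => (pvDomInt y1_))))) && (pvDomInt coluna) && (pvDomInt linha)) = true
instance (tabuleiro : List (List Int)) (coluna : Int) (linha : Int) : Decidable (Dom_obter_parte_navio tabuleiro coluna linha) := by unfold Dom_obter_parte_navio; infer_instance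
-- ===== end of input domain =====

-- B replaces A's backward while-walk to the ship's first column with a forward run-length
-- pass over the strict row prefix (reset-on-miss counter), returning counter + 1.

-- ===== PORT A =====
-- the 'while primeira_coluna > 0 and tabuleiro[linha][primeira_coluna-1] == id_navio' loop
def pvFirstCol (row : List Int) (idn : Int) (pc : Int) : Int :=
  if h : 0 < pc ∧ (PySem.List.pyGet? row (pc - 1)).getD 0 = idn then
    pvFirstCol row idn (pc - 1)
  else pc
termination_by pc.toNat
decreasing_by omega

def obter_parte_navio (tabuleiro : List (List Int)) (coluna : Int) (linha : Int) : Int :=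
  let row := (PySem.List.pyGet? tabuleiro linha).getD []
  let id_navio := (PySem.List.pyGet? row coluna).getD 0
  if id_navio = 0 then 0
  else coluna - pvFirstCol row id_navio coluna + 1

-- ===== PORT B =====
def obter_parte_navio_alt (tabuleiro : List (List Int)) (coluna : Int) (linha : Int) : Int :=
  let linha_atual := (PySem.List.pyGet? tabuleiro linha).getD []
  let id_navio := (PySem.List.pyGet? linha_atual coluna).getD 0
  if id_navio = 0 then 0
  else ((PySem.List.pyRange 0 coluna 1).foldl
    (fun corrida c => if (PySem.List.pyGet? linha_atual c).getD 0 = id_navio then corrida + 1 else 0) 0) + 1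

-- ===== PRECONDITION & SPEC =====
-- A raises IndexError when linha is out of range of the board or coluna out of range of
-- that row; exactly those inputs are excluded (the proof itself needs no bound).
def Pre_obter_parte_navio (tabuleiro : List (List Int)) (coluna : Int) (linha : Int) : Prop :=
  PySem.Raise.InRange tabuleiro.length linha ∧
  PySem.Raise.InRange ((PySem.List.pyGet? tabuleiro linha).getD []).length coluna
instance (tabuleiro : List (List Int)) (coluna : Int) (linha : Int) : Decidable (Pre_obter_parte_navio tabuleiro coluna linha) := by unfold Pre_obter_parte_navio; infer_instance
def pvWitness_obter_parte_navio : List (List Int) × Int × Int := ([[0, 3, 3]], 2, 0)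

def Spec_obter_parte_navio (tabuleiro : List (List Int)) (coluna : Int) (linha : Int) (out : Int) : Prop := out = obter_parte_navio_alt tabuleiro coluna linha
instance (tabuleiro : List (List Int)) (coluna : Int) (linha : Int) (out : Int) : Decidable (Spec_obter_parte_navio tabuleiro coluna linha out) := by unfold Spec_obter_parte_navio; infer_instance

-- ===== CLAIM (what is proved, stated in full; the proofs are below) =====
def Claim_equal_obter_parte_navio : Prop := ∀ (tabuleiro : List (List Int)) (coluna : Int) (linha : Int), Dom_obter_parte_navio tabuleiro coluna linha → Pre_obter_parte_navio tabuleiro coluna linha → Spec_obter_parte_navio tabuleiro coluna linha (obter_parte_navio tabuleiro coluna linha)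

-- ===== LEMMAS AND PROOFS =====

theorem pvFirstCol_nonpos (row : List Int) (idn : Int) (pc : Int) (h : pc ≤ 0) :
    pvFirstCol row idn pc = pc := by
  unfold pvFirstCol
  rw [dif_neg]
  intro hc
  omega

-- the forward run-length fold over range(0, n) equals n minus the first column of the run ending at n
theorem pvFold_eq (row : List Int) (idn : Int) (n : Nat) :
    (PySem.List.pyRange 0 (n : Int) 1).foldl
      (fun corrida c => if (PySem.List.pyGet? row c).getD 0 = idn then corrida + 1 else 0) 0
    = (n : Int) - pvFirstCol row idn (n : Int) := by
  induction n with
  | zero =>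
    simp only [Nat.cast_zero]
    rw [PySem.List.pyRange_one_eq_nil (by omega), pvFirstCol_nonpos row idn 0 (by omega)]
    simp
  | succ n ih =>
    push_cast
    rw [PySem.List.pyRange_one_succ_right (by omega : (0:Int) ≤ (n:Int)), List.foldl_append, ih]
    simp only [List.foldl_cons, List.foldl_nil]
    by_cases h : (PySem.List.pyGet? row (n : Int)).getD 0 = idn
    · rw [if_pos h]
      conv_rhs => rw [pvFirstCol]
      rw [dif_pos ⟨by omega, by simpa using h⟩]
      rw [show (n : Int) + 1 - 1 = (n : Int) by ring]
      omega
    · rw [if_neg h]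
      conv_rhs => rw [pvFirstCol]
      rw [dif_neg]
      · omega
      · intro hcon
        exact h (by simpa using hcon.2)

-- ===== VERDICT (by name: the statement is the Claim_ definition above) =====
theorem obter_parte_navio_spec : Claim_equal_obter_parte_navio := by
  intro tabuleiro coluna linha _ _
  unfold Spec_obter_parte_navio obter_parte_navio obter_parte_navio_alt
  simp only []
  set row := (PySem.List.pyGet? tabuleiro linha).getD [] with hrow
  set idn := (PySem.List.pyGet? row coluna).getD 0 with hid
  by_cases h0 : idn = 0
  · rw [if_pos h0, if_pos h0]
  · rw [if_neg h0, if_neg h0]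
    by_cases hc : 0 ≤ coluna
    · obtain ⟨n, hn⟩ : ∃ n : Nat, coluna = (n : Int) := ⟨coluna.toNat, by omega⟩
      subst hn
      rw [pvFold_eq row idn n]
    · rw [pvFirstCol_nonpos row idn coluna (by omega),
        PySem.List.pyRange_one_eq_nil (by omega)]
      simp
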